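-- pv_equiv track=rewrite | github.com/puiying/cky-parser | cky_parser.py | add_rules_recursively
-- ===== SOURCE A (Python) =====
-- def get_key(grammar_dict, lookup_val):
--     # placeholder for key
--     key = []
--     for lhs, rhs in grammar_dict.items():
--         for i in rhs:
--             if i == lookup_val:
--                 key.append(lhs)
--     return key
--
-- def add_rules_recursively(grammar_dict, lookup, rules_dict):
--     lhs = get_key(grammar_dict, lookup)
--     rhs = [lookup] * len(lhs)
--     while len(lhs) > 0:
--         # placeholder to look for all unit production rules
--         lhs_next = []
--         rhs_next = []
--         for key, val in zip(lhs, rhs):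
--             # append rules that match the lookup value
--             if key in rules_dict.keys() and val not in rules_dict[key]:
--                 rules_dict[key].extend([val])
--             elif key not in rules_dict.keys():
--                 rules_dict[key] = [val]
--             # add #3 unit production rules recursively
--             unit_rules = get_key(grammar_dict, key)
--             lhs_next.extend(unit_rules)
--             rhs_next.extend([key] * len(unit_rules))
--         # redirect to look for all unit production rules
--         lhs = lhs_next
--         rhs = rhs_next
--     return rules_dict
-- ===== SOURCE B (Python) =====
-- def add_rules_recursively(grammar_dict, lookup, rules_dict):
--     # reverse index: symbol -> list of lhs whose rhs contains it (one entry per occurrence)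
--     rev = {}
--     for lhs, rhs in grammar_dict.items():
--         for sym in rhs:
--             rev.setdefault(sym, []).append(lhs)
--     # FIFO queue of (key, val) unit productions; index pointer instead of pop(0)
--     queue = [(k, lookup) for k in rev.get(lookup, [])]
--     i = 0
--     while i < len(queue):
--         key, val = queue[i]
--         i += 1
--         bucket = rules_dict.get(key)
--         if bucket is None:
--             rules_dict[key] = [val]
--         elif val not in bucket:
--             bucket.append(val)
--         for parent in rev.get(key, []):
--             queue.append((parent, key))
--     return rules_dict
-- ===== Notes on version B (the rewrite author's own statement) =====
-- stated objective: alternative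
-- what changed: B builds a reverse index (symbol -> producing lhs) once and walks a single FIFO queue of (key, val) pairs, replacing A's full-grammar scan (get_key) per visited node and its level-by-level parallel lhs/rhs lists; same value, cost shifts from O(visited*G) scans to one O(G) index build plus O(1) lookups.
import Mathlib
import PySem

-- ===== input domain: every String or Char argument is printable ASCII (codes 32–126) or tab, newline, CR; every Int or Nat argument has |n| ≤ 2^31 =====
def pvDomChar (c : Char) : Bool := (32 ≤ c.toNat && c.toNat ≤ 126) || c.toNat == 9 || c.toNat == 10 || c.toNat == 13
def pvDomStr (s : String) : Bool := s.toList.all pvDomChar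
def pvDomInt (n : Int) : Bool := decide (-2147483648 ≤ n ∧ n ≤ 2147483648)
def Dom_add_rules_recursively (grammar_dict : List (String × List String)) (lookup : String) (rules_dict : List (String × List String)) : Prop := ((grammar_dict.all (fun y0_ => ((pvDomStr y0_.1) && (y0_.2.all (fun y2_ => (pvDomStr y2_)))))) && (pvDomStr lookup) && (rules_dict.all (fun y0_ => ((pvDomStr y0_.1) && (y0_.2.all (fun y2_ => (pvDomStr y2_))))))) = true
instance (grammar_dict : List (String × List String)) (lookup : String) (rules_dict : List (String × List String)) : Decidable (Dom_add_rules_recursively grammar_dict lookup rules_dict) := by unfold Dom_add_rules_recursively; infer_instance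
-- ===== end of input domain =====

-- B replaces A's full grammar scan per visited node (get_key) by a reverse index symbol → lhs built
-- once, and A's level-by-level parallel lists by a FIFO queue of (key, val) pairs; same return value.
-- Both Pythons mutate rules_dict in place and return it; the equivalence proved here is about the
-- returned dict (which is also the final state of the argument, identical in both).

-- ===== PORT A =====
def get_key (grammar_dict : List (String × List String)) (lookup_val : String) : List String :=
  grammar_dict.foldl (fun key p =>
    p.2.foldl (fun key i => if i == lookup_val then key ++ [p.1] else key) key) []

-- one iteration of A's `for key, val in zip(lhs, rhs)` body, state (lhs_next, rhs_next, rules_dict)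
def arr_step (grammar_dict : List (String × List String))
    (st : List String × List String × PySem.Dict String (List String))
    (kv : String × String) : List String × List String × PySem.Dict String (List String) :=
  let rules :=
    if st.2.2.contains kv.1 && !((st.2.2.getD kv.1 []).contains kv.2) then
      st.2.2.insert kv.1 ((st.2.2.getD kv.1 []) ++ [kv.2])
    else if !(st.2.2.contains kv.1) then st.2.2.insert kv.1 [kv.2]
    else st.2.2
  let unit_rules := get_key grammar_dict kv.1
  (st.1 ++ unit_rules, st.2.1 ++ List.replicate unit_rules.length kv.1, rules)

-- A's while loop; the Nat argument is only a fuel guard making the recursion total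
-- (under Pre_ the loop reaches lhs = [] before grammar_dict.length + 1 rounds, see below)
def arr_loop (grammar_dict : List (String × List String)) :
    Nat → List String → List String → PySem.Dict String (List String) → PySem.Dict String (List String)
  | 0, _, _, rules => rules
  | fuel + 1, lhs, rhs, rules =>
    if lhs.length > 0 then
      let st := (lhs.zip rhs).foldl (arr_step grammar_dict) ([], [], rules)
      arr_loop grammar_dict fuel st.1 st.2.1 st.2.2
    else rules

def add_rules_recursively (grammar_dict : List (String × List String)) (lookup : String) (rules_dict : List (String × List String)) : List (String × List String) :=
  let lhs := get_key grammar_dict lookup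
  let rhs := List.replicate lhs.length lookup
  (arr_loop grammar_dict (grammar_dict.length + 1) lhs rhs (PySem.Dict.mk rules_dict)).items

-- ===== PORT B =====
-- reverse index: symbol ↦ every lhs whose rhs mentions it (rev.setdefault(sym, []).append(lhs))
def build_rev (grammar_dict : List (String × List String)) : PySem.Dict String (List String) :=
  grammar_dict.foldl (fun rev p =>
    p.2.foldl (fun rev sym => rev.modify sym [] (fun b => b ++ [p.1])) rev) PySem.Dict.empty

-- B's rules_dict update: bucket = rules_dict.get(key); insert or append
def alt_update (rules : PySem.Dict String (List String)) (key val : String) :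
    PySem.Dict String (List String) :=
  match rules.get? key with
  | none => rules.insert key [val]
  | some bucket => if bucket.contains val then rules else rules.insert key (bucket ++ [val])

-- B's queue walk: the list is the remaining suffix queue[i:] of the growing FIFO queue;
-- the Nat argument is only a fuel guard making the recursion total
def alt_loop (rev : PySem.Dict String (List String)) :
    Nat → List (String × String) → PySem.Dict String (List String) → PySem.Dict String (List String)
  | 0, _, rules => rules
  | _ + 1, [], rules => rules
  | fuel + 1, kv :: queue, rules =>
    alt_loop rev fuel (queue ++ (rev.getD kv.1 []).map (fun parent => (parent, kv.1)))
      (alt_update rules kv.1 kv.2)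

def add_rules_recursively_alt (grammar_dict : List (String × List String)) (lookup : String) (rules_dict : List (String × List String)) : List (String × List String) :=
  let rev := build_rev grammar_dict
  let queue := (rev.getD lookup []).map (fun k => (k, lookup))
  (alt_loop rev (((grammar_dict.map (fun p => p.2.length)).sum + 1) ^ (grammar_dict.length + 2))
    queue (PySem.Dict.mk rules_dict)).items

-- ===== PRECONDITION & SPEC =====
-- all lhs producing k in one unit step (as a set of keys)
def pvParents (grammar_dict : List (String × List String)) (k : String) : List String :=
  (grammar_dict.filter (fun p => p.2.contains k)).map (fun p => p.1)

-- the set of keys reachable from `fr` in exactly f reverse unit steps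
def pvFrontier (grammar_dict : List (String × List String)) : Nat → List String → List String
  | 0, fr => fr
  | f + 1, fr => pvFrontier grammar_dict f ((fr.flatMap (pvParents grammar_dict)).dedup)

-- Pre_ excludes exactly the inputs on which A's while loop never terminates: grammars with a
-- unit-production cycle backward-reachable from lookup, i.e. a reverse unit chain from lookup
-- longer than the number of grammar rules.
def Pre_add_rules_recursively (grammar_dict : List (String × List String)) (lookup : String) (rules_dict : List (String × List String)) : Prop :=
  pvFrontier grammar_dict (grammar_dict.length + 1) [lookup] = []
instance (grammar_dict : List (String × List String)) (lookup : String) (rules_dict : List (String × List String)) : Decidable (Pre_add_rules_recursively grammar_dict lookup rules_dict) := by unfold Pre_add_rules_recursively; infer_instance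

def pvWitness_add_rules_recursively : (List (String × List String)) × String × (List (String × List String)) :=
  ([("S", ["NP", "VP"]), ("X", ["S"])], "NP", [("S", ["a"])])

def Spec_add_rules_recursively (grammar_dict : List (String × List String)) (lookup : String) (rules_dict : List (String × List String)) (out : List (String × List String)) : Prop := out = add_rules_recursively_alt grammar_dict lookup rules_dict
instance (grammar_dict : List (String × List String)) (lookup : String) (rules_dict : List (String × List String)) (out : List (String × List String)) : Decidable (Spec_add_rules_recursively grammar_dict lookup rules_dict out) := by unfold Spec_add_rules_recursively; infer_instance

-- ===== CLAIM (what is proved, stated in full; the proofs are below) =====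
def Claim_equal_add_rules_recursively : Prop := ∀ (grammar_dict : List (String × List String)) (lookup : String) (rules_dict : List (String × List String)), Dom_add_rules_recursively grammar_dict lookup rules_dict → Pre_add_rules_recursively grammar_dict lookup rules_dict → Spec_add_rules_recursively grammar_dict lookup rules_dict (add_rules_recursively grammar_dict lookup rules_dict)

-- ===== LEMMAS AND PROOFS =====

-- proof-side vocabulary
def pvEdges (g : List (String × List String)) : List (String × String) :=
  g.flatMap (fun p => p.2.map (fun i => (i, p.1)))

def pvE (g : List (String × List String)) : Nat := (g.map (fun p => p.2.length)).sum

def pvChildren (g : List (String × List String)) (pairs : List (String × String)) :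
    List (String × String) :=
  pairs.flatMap (fun kv => (get_key g kv.1).map (fun parent => (parent, kv.1)))

def pvUpd (d : PySem.Dict String (List String)) (kv : String × String) :
    PySem.Dict String (List String) := alt_update d kv.1 kv.2

-- A's loop re-expressed on the zipped pair list
def pvLoopP (g : List (String × List String)) :
    Nat → List (String × String) → PySem.Dict String (List String) → PySem.Dict String (List String)
  | 0, _, d => d
  | f + 1, pairs, d =>
    if pairs.length > 0 then pvLoopP g f (pvChildren g pairs) (pairs.foldl pvUpd d) else d

def pvNiter (g : List (String × List String)) : Nat → List (String × String) → List (String × String)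
  | 0, pairs => pairs
  | f + 1, pairs => pvNiter g f (pvChildren g pairs)

def pvCnt (g : List (String × List String)) : Nat → List (String × String) → Nat
  | 0, _ => 0
  | f + 1, pairs => pairs.length + pvCnt g f (pvChildren g pairs)

theorem get_key_foldl (g : List (String × List String)) (k : String) :
    get_key g k = (pvEdges g).foldl
      (fun acc e => if e.1 == k then acc ++ [e.2] else acc) [] := by
  unfold get_key pvEdges
  rw [List.foldl_flatMap]
  simp [List.foldl_map]

theorem get_key_eq (g : List (String × List String)) (k : String) :
    get_key g k = ((pvEdges g).filter (fun e => e.1 == k)).map (fun e => e.2) := by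
  rw [get_key_foldl, PySem.List.foldl_append_if]
  simp

theorem build_rev_getD (g : List (String × List String)) (k : String) :
    (build_rev g).getD k [] = get_key g k := by
  have h : build_rev g = (pvEdges g).foldl
      (fun d p => d.modify p.1 [] (fun b => b ++ [p.2])) PySem.Dict.empty := by
    unfold build_rev pvEdges
    rw [List.foldl_flatMap]
    simp [List.foldl_map]
  rw [h, PySem.Dict.getD_foldl_modify_append, get_key_eq]
  simp

theorem mem_get_key (g : List (String × List String)) (k x : String) :
    x ∈ get_key g k ↔ x ∈ pvParents g k := by
  rw [get_key_eq]
  simp [pvEdges, pvParents, List.mem_filter, List.mem_flatMap]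

theorem update_eq (d : PySem.Dict String (List String)) (k v : String) :
    (if d.contains k && !((d.getD k []).contains v) then d.insert k ((d.getD k []) ++ [v])
     else if !(d.contains k) then d.insert k [v] else d) = alt_update d k v := by
  unfold alt_update
  rw [PySem.Dict.contains_eq_isSome_get?]
  cases h : d.get? k with
  | none => simp [PySem.Dict.getD_eq_get?_getD, h]
  | some b =>
    have hb : d.getD k [] = b := PySem.Dict.getD_of_get?_eq_some d [] h
    cases hc : b.contains v <;> simp [hb, hc]

theorem foldA_spec (g : List (String × List String)) (pairs : List (String × String))
    (l0 r0 : List String) (d : PySem.Dict String (List String)) :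
    pairs.foldl (arr_step g) (l0, r0, d) =
      (l0 ++ (pvChildren g pairs).map (fun e => e.1),
       r0 ++ (pvChildren g pairs).map (fun e => e.2),
       pairs.foldl pvUpd d) := by
  induction pairs generalizing l0 r0 d with
  | nil => simp [pvChildren]
  | cons kv t ih =>
    have hstep : arr_step g (l0, r0, d) kv =
        (l0 ++ get_key g kv.1, r0 ++ List.replicate (get_key g kv.1).length kv.1,
         pvUpd d kv) := by
      simp only [arr_step, pvUpd, ← update_eq]
    simp only [List.foldl_cons, hstep, ih]
    simp [pvChildren, List.map_map, Function.comp_def, List.map_const']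

theorem zip_map_pair {α β : Type} (l : List α) (b : β) :
    l.zip (List.replicate l.length b) = l.map (fun a => (a, b)) := by
  induction l with
  | nil => rfl
  | cons x t ih => simp [List.replicate_succ, ih]

theorem arr_loop_eq (g : List (String × List String)) (f : Nat) :
    ∀ (lhs rhs : List String) (d : PySem.Dict String (List String)),
      lhs.length = rhs.length →
      arr_loop g f lhs rhs d = pvLoopP g f (lhs.zip rhs) d := by
  induction f with
  | zero => intro lhs rhs d _; rfl
  | succ f ih =>
    intro lhs rhs d hlen
    simp only [arr_loop, pvLoopP, List.length_zip, ← hlen, Nat.min_self]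
    split
    · rw [foldA_spec]
      have hz : (pvChildren g (lhs.zip rhs)).map (fun e => e.1) ++ [] = _ := rfl
      simp only [List.nil_append]
      rw [ih _ _ _ (by simp)]
      congr 1
      exact (List.zip_of_prod rfl rfl).symm
    · rfl

theorem alt_loop_nil (rev : PySem.Dict String (List String)) (f : Nat)
    (d : PySem.Dict String (List String)) : alt_loop rev f [] d = d := by
  cases f <;> rfl

theorem alt_seg (g : List (String × List String)) (rev : PySem.Dict String (List String))
    (hrev : ∀ k, rev.getD k [] = get_key g k) (seg : List (String × String)) :
    ∀ (rest : List (String × String)) (d : PySem.Dict String (List String)) (F : Nat),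
      alt_loop rev (seg.length + F) (seg ++ rest) d =
        alt_loop rev F (rest ++ pvChildren g seg) (seg.foldl pvUpd d) := by
  induction seg with
  | nil => intro rest d F; simp [pvChildren]
  | cons kv t ih =>
    intro rest d F
    have h1 : (kv :: t).length + F = (t.length + F) + 1 := by simp; omega
    rw [h1]
    show alt_loop rev (t.length + F) ((t ++ rest) ++ (rev.getD kv.1 []).map _) _ = _
    rw [hrev, List.append_assoc]
    have hih := ih (rest ++ (get_key g kv.1).map (fun parent => (parent, kv.1))) (pvUpd d kv) F
    simp only [pvUpd] at hih
    rw [hih]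
    simp [pvChildren, pvUpd]

theorem alt_eq_loopP (g : List (String × List String)) (rev : PySem.Dict String (List String))
    (hrev : ∀ k, rev.getD k [] = get_key g k) (f : Nat) :
    ∀ (pairs : List (String × String)) (d : PySem.Dict String (List String)) (F : Nat),
      pvNiter g f pairs = [] → pvCnt g f pairs ≤ F →
      alt_loop rev F pairs d = pvLoopP g f pairs d := by
  induction f with
  | zero =>
    intro pairs d F hn _
    simp only [pvNiter] at hn
    subst hn
    exact alt_loop_nil rev F d
  | succ f ih =>
    intro pairs d F hn hc
    by_cases hp : pairs = []
    · subst hp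
      rw [alt_loop_nil]
      simp [pvLoopP]
    · have hlen : pairs.length > 0 := List.length_pos_iff.mpr hp
      simp only [pvLoopP, if_pos hlen]
      simp only [pvCnt] at hc
      have hF : F = pairs.length + (F - pairs.length) := by omega
      rw [hF]
      have := alt_seg g rev hrev pairs [] d (F - pairs.length)
      simp only [List.append_nil, List.nil_append] at this
      rw [this]
      exact ih (pvChildren g pairs) (pairs.foldl pvUpd d) (F - pairs.length)
        (by simpa [pvNiter] using hn) (by omega)

theorem pv_frontier_empty (g : List (String × List String)) (f : Nat) :
    ∀ (fr : List String) (pairs : List (String × String)),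
      (∀ kv ∈ pairs, kv.1 ∈ fr) → pvFrontier g f fr = [] → pvNiter g f pairs = [] := by
  induction f with
  | zero =>
    intro fr pairs hmem hfr
    simp only [pvFrontier] at hfr
    subst hfr
    cases pairs with
    | nil => rfl
    | cons kv t => exact absurd (hmem kv (by simp)) (by simp)
  | succ f ih =>
    intro fr pairs hmem hfr
    simp only [pvFrontier] at hfr
    simp only [pvNiter]
    apply ih _ _ _ hfr
    intro kv' hkv'
    simp only [pvChildren, List.mem_flatMap, List.mem_map] at hkv'
    obtain ⟨kv, hkv, parent, hparent, heq⟩ := hkv'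
    rw [List.mem_dedup, List.mem_flatMap]
    refine ⟨kv.1, hmem kv hkv, ?_⟩
    have : parent ∈ pvParents g kv.1 := (mem_get_key g kv.1 parent).mp hparent
    simpa [← heq] using this

theorem niter_succ (g : List (String × List String)) (f : Nat) :
    ∀ pairs, pvNiter g f pairs = [] → pvNiter g (f + 1) pairs = [] := by
  induction f with
  | zero =>
    intro pairs h
    simp only [pvNiter] at *
    subst h
    simp [pvChildren]
  | succ f ih =>
    intro pairs h
    simp only [pvNiter] at h ⊢
    exact ih _ h

theorem get_key_len_le (g : List (String × List String)) (k : String) :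
    (get_key g k).length ≤ pvE g := by
  rw [get_key_eq, List.length_map]
  calc ((pvEdges g).filter (fun e => e.1 == k)).length ≤ (pvEdges g).length :=
        List.length_filter_le _ _
    _ = pvE g := by
        unfold pvEdges pvE
        rw [List.length_flatMap]
        simp

theorem children_len_le (g : List (String × List String)) (pairs : List (String × String)) :
    (pvChildren g pairs).length ≤ pairs.length * pvE g := by
  induction pairs with
  | nil => simp [pvChildren]
  | cons kv t ih =>
    simp only [pvChildren, List.flatMap_cons, List.length_append, List.length_map,
      List.length_cons]
    have h1 := get_key_len_le g kv.1
    have h2 : (t.flatMap (fun kv => (get_key g kv.1).map (fun parent => (parent, kv.1)))).length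
        ≤ t.length * pvE g := ih
    calc (get_key g kv.1).length + _ ≤ pvE g + t.length * pvE g := Nat.add_le_add h1 h2
      _ = (t.length + 1) * pvE g := by ring

theorem cnt_le (g : List (String × List String)) (f : Nat) :
    ∀ pairs : List (String × String), pvCnt g f pairs ≤ pairs.length * (pvE g + 1) ^ f := by
  induction f with
  | zero => intro pairs; simp [pvCnt]
  | succ f ih =>
    intro pairs
    simp only [pvCnt]
    have h1 : pvCnt g f (pvChildren g pairs) ≤ (pvChildren g pairs).length * (pvE g + 1) ^ f :=
      ih _
    have h2 : (pvChildren g pairs).length * (pvE g + 1) ^ f ≤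
        (pairs.length * pvE g) * (pvE g + 1) ^ f :=
      Nat.mul_le_mul_right _ (children_len_le g pairs)
    have h3 : pairs.length ≤ pairs.length * (pvE g + 1) ^ f :=
      Nat.le_mul_of_pos_right _ (Nat.pow_pos (by omega))
    calc pairs.length + pvCnt g f (pvChildren g pairs)
        ≤ pairs.length * (pvE g + 1) ^ f + (pairs.length * pvE g) * (pvE g + 1) ^ f :=
          Nat.add_le_add h3 (le_trans h1 h2)
      _ = pairs.length * (pvE g + 1) ^ (f + 1) := by ring

-- ===== VERDICT (by name: the statement is the Claim_ definition above) =====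
theorem add_rules_recursively_spec : Claim_equal_add_rules_recursively := by
  intro g lookup rd _dom hpre
  unfold Spec_add_rules_recursively
  unfold Pre_add_rules_recursively at hpre
  have hrev : ∀ k, (build_rev g).getD k [] = get_key g k := build_rev_getD g
  set pairs0 : List (String × String) := (get_key g lookup).map (fun k => (k, lookup)) with hp0
  -- A's loop reaches the empty level within g.length + 1 rounds
  have hmem : ∀ kv ∈ pairs0, kv.1 ∈ (([lookup].flatMap (pvParents g)).dedup) := by
    intro kv hkv
    simp only [hp0, List.mem_map] at hkv
    obtain ⟨k, hk, hkv⟩ := hkv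
    rw [List.mem_dedup]
    simp only [List.flatMap_cons, List.flatMap_nil, List.append_nil]
    rw [← hkv]
    exact (mem_get_key g lookup k).mp hk
  have hniter : pvNiter g (g.length + 1) pairs0 = [] := by
    apply niter_succ
    exact pv_frontier_empty g g.length _ pairs0 hmem hpre
  -- B's fuel bound covers the total number of processed queue items
  have hcnt : pvCnt g (g.length + 1) pairs0 ≤ (pvE g + 1) ^ (g.length + 2) := by
    have h1 : pvCnt g (g.length + 1) pairs0 ≤ pairs0.length * (pvE g + 1) ^ (g.length + 1) :=
      cnt_le g _ pairs0
    have h2 : pairs0.length ≤ pvE g := by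
      simpa [hp0] using get_key_len_le g lookup
    calc pvCnt g (g.length + 1) pairs0 ≤ pvE g * (pvE g + 1) ^ (g.length + 1) :=
          le_trans h1 (Nat.mul_le_mul_right _ h2)
      _ ≤ (pvE g + 1) * (pvE g + 1) ^ (g.length + 1) :=
          Nat.mul_le_mul_right _ (by omega)
      _ = (pvE g + 1) ^ (g.length + 2) := by ring
  -- both sides compute pvLoopP g (g.length + 1) pairs0
  show (arr_loop g (g.length + 1) (get_key g lookup)
      (List.replicate (get_key g lookup).length lookup) (PySem.Dict.mk rd)).items = _
  rw [arr_loop_eq g _ _ _ _ (by simp), zip_map_pair]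
  show _ = (alt_loop (build_rev g) (((g.map (fun p => p.2.length)).sum + 1) ^ (g.length + 2))
      ((((build_rev g).getD lookup [])).map (fun k => (k, lookup))) (PySem.Dict.mk rd)).items
  rw [hrev lookup]
  have hEeq : (g.map (fun p => p.2.length)).sum = pvE g := rfl
  rw [hEeq, alt_eq_loopP g (build_rev g) hrev (g.length + 1) pairs0 (PySem.Dict.mk rd) _
    hniter hcnt]
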